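-- pv_equiv track=rewrite | github.com/andersberggren/AdventOfCode2018 | dec02/dec02.py | hasCharacterOccurringExactlyThisManyTimes
-- ===== SOURCE A (Python) =====
-- def hasCharacterOccurringExactlyThisManyTimes(boxID, numberOfTimes):
-- 	charCounter = {}
-- 	for char in boxID:
-- 		if char in charCounter:
-- 			charCounter[char] += 1
-- 		else:
-- 			charCounter[char] = 1
-- 	for (char, occurrences) in charCounter.items():
-- 		if occurrences == numberOfTimes:
-- 			return True
-- 	return False
-- ===== SOURCE B (Python) =====
-- def hasCharacterOccurringExactlyThisManyTimes(boxID, numberOfTimes):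
--     s = sorted(boxID)
--     i = 0
--     n = len(s)
--     while i < n:
--         j = i + 1
--         while j < n and s[j] == s[i]:
--             j += 1
--         if j - i == numberOfTimes:
--             return True
--         i = j
--     return False
-- ===== Notes on version B (the rewrite author's own statement) =====
-- stated objective: alternative
-- what changed: Replaced the hash-map character counter plus scan over distinct keys with a sort-then-run-length strategy: sort the characters once and make a single pass over the sorted list, jumping run by run and returning True as soon as a run's length equals numberOfTimes.
import Mathlib
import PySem

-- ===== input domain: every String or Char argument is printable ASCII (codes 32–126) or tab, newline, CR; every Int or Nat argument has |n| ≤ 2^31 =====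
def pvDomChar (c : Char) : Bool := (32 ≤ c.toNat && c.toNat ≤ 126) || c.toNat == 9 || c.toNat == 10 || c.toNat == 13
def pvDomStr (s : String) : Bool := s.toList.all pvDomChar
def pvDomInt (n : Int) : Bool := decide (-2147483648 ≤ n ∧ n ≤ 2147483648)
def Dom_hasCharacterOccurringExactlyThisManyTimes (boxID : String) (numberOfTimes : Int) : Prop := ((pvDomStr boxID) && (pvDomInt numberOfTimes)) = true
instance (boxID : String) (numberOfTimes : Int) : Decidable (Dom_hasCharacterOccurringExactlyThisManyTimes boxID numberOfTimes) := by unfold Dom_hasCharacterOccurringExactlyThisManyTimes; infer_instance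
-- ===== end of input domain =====

-- B replaces A's hash-map character counter + scan over distinct keys with a sort-then-run-length
-- single pass (alternative algorithm, same result).

-- ===== PORT A =====
-- builds charCounter, then scans its items for a count equal to numberOfTimes
def hasCharacterOccurringExactlyThisManyTimes (boxID : String) (numberOfTimes : Int) : Bool :=
  let charCounter := boxID.toList.foldl
    (fun d c => if d.contains c then d.insert c (d.getD c 0 + 1) else d.insert c 1)
    PySem.Dict.empty
  charCounter.items.any (fun p => p.2 == numberOfTimes)

-- ===== PORT B =====
-- the while loop over the sorted list: measure the run starting at position i (1 + the chars equal
-- to s[i] that follow), return True if its length is numberOfTimes, else jump to the run's end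
def pvRunScan (s : List Char) (numberOfTimes : Int) : Bool :=
  match s with
  | [] => false
  | c :: rest =>
    if ((1 + (rest.takeWhile (fun x => x == c)).length : Int) == numberOfTimes) then true
    else pvRunScan (rest.dropWhile (fun x => x == c)) numberOfTimes
termination_by s.length
decreasing_by
  simp only [List.length_cons]
  exact Nat.lt_succ_of_le (List.length_dropWhile_le _ _)

def hasCharacterOccurringExactlyThisManyTimes_alt (boxID : String) (numberOfTimes : Int) : Bool :=
  pvRunScan (PySem.List.sorted boxID.toList (fun x => x) false) numberOfTimes

-- ===== PRECONDITION & SPEC =====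
def Spec_hasCharacterOccurringExactlyThisManyTimes (boxID : String) (numberOfTimes : Int) (out : Bool) : Prop := out = hasCharacterOccurringExactlyThisManyTimes_alt boxID numberOfTimes
instance (boxID : String) (numberOfTimes : Int) (out : Bool) : Decidable (Spec_hasCharacterOccurringExactlyThisManyTimes boxID numberOfTimes out) := by unfold Spec_hasCharacterOccurringExactlyThisManyTimes; infer_instance

-- ===== CLAIM (what is proved, stated in full; the proofs are below) =====
def Claim_equal_hasCharacterOccurringExactlyThisManyTimes : Prop := ∀ (boxID : String) (numberOfTimes : Int), Dom_hasCharacterOccurringExactlyThisManyTimes boxID numberOfTimes → Spec_hasCharacterOccurringExactlyThisManyTimes boxID numberOfTimes (hasCharacterOccurringExactlyThisManyTimes boxID numberOfTimes)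

-- ===== LEMMAS AND PROOFS =====

-- A's fold equals the Counter fold: when the key is absent, getD returns the default 0
lemma pvFoldA_eq_counter (l : List Char) :
    l.foldl (fun d c => if d.contains c then d.insert c (d.getD c 0 + 1) else d.insert c 1)
      PySem.Dict.empty = PySem.Dict.counter l := by
  have hfun : (fun (d : PySem.Dict Char Int) c =>
      if d.contains c then d.insert c (d.getD c 0 + 1) else d.insert c 1)
      = fun d c => d.insert c (d.getD c 0 + 1) := by
    funext d c
    by_cases h : d.contains c
    · simp [h]
    · have hg : d.getD c 0 = 0 := by
        have hn := (PySem.Dict.get?_eq_none_iff_contains d c).mpr (by simp [h])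
        simp [PySem.Dict.getD, hn]
      simp [h, hg]
  rw [hfun, PySem.Dict.foldl_insert_getD_add_one_eq_counter]

-- port A computes: some character of l has count equal to n
lemma portA_eq_any (l : List Char) (n : Int) :
    ((PySem.Dict.counter l).items.any (fun p => p.2 == n))
      = l.any (fun c => ((l.count c : Int) == n)) := by
  rw [PySem.Dict.items_counter]
  rw [Bool.eq_iff_iff]
  simp only [List.any_map, List.any_eq_true, Function.comp]
  constructor
  · rintro ⟨k, hk, h⟩
    exact ⟨k, (PySem.Set.mem_ofList l k).mp hk, h⟩
  · rintro ⟨k, hk, h⟩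
    exact ⟨k, (PySem.Set.mem_ofList l k).mpr hk, h⟩

-- helper facts about the head run of a ≤-sorted nonempty list
lemma pvDrop_count_zero (c : Char) (rest : List Char)
    (hp : (c :: rest).Pairwise (· ≤ ·)) :
    (rest.dropWhile (fun x => x == c)).count c = 0 := by
  apply List.count_eq_zero.mpr
  intro hmem
  cases hd : rest.dropWhile (fun x => x == c) with
  | nil => simp [hd] at hmem
  | cons d ds =>
    have hdc : (d == c) = false := by
      have := List.head_dropWhile_not (p := fun x => x == c) (l := rest) (by simp [hd])
      simpa [hd] using this
    have hdc' : d ≠ c := by intro he; rw [he] at hdc; simp at hdc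
    rw [hd] at hmem
    have hcle : ∀ x ∈ rest, c ≤ x := (List.pairwise_cons.mp hp).1
    have hdrest : d ∈ rest := by
      have : d ∈ rest.dropWhile (fun x => x == c) := by simp [hd]
      exact (List.dropWhile_sublist _).mem this
    have hcd : c < d := lt_of_le_of_ne (hcle d hdrest) (Ne.symm hdc')
    rcases List.mem_cons.mp hmem with rfl | hcds
    · exact absurd rfl (ne_of_gt hcd)
    · have hpd : (d :: ds).Pairwise (· ≤ ·) := by
        have := ((List.pairwise_cons.mp hp).2).sublist (List.dropWhile_sublist (fun x => x == c))
        rwa [hd] at this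
      have : d ≤ c := (List.pairwise_cons.mp hpd).1 c hcds
      exact absurd (lt_of_lt_of_le hcd this) (lt_irrefl c)

lemma pvHead_count (c : Char) (rest : List Char)
    (hp : (c :: rest).Pairwise (· ≤ ·)) :
    (c :: rest).count c = 1 + (rest.takeWhile (fun x => x == c)).length := by
  have hrun : (rest.takeWhile (fun x => x == c)).count c
      = (rest.takeWhile (fun x => x == c)).length := by
    apply List.count_eq_length.mpr
    intro b hb
    have hb' := List.mem_takeWhile_imp hb
    exact (beq_iff_eq.mp hb').symm
  have happ := List.count_append (a := c)
    (l₁ := rest.takeWhile (fun x => x == c)) (l₂ := rest.dropWhile (fun x => x == c))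
  rw [List.takeWhile_append_dropWhile] at happ
  have hcons : (c :: rest).count c = rest.count c + 1 := by simp
  rw [hcons, happ, hrun, pvDrop_count_zero c rest hp]
  omega

lemma pvRunScan_eq_any (l : List Char) (n : Int) :
    l.Pairwise (· ≤ ·) → pvRunScan l n = l.any (fun c => ((l.count c : Int) == n)) := by
  induction l using pvRunScan.induct n with
  | case1 => intro _; simp [pvRunScan]
  | case2 c rest h =>
    intro hp
    rw [pvRunScan, if_pos h, Bool.eq_iff_iff]
    simp only [List.any_eq_true, true_iff]
    refine ⟨c, List.mem_cons_self, ?_⟩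
    have hc := pvHead_count c rest hp
    rw [hc]
    push_cast
    exact h
  | case3 c rest h ih =>
    intro hp
    have hdp : (rest.dropWhile (fun x => x == c)).Pairwise (· ≤ ·) :=
      ((List.pairwise_cons.mp hp).2).sublist (List.dropWhile_sublist (fun x => x == c))
    rw [pvRunScan, if_neg h, ih hdp, Bool.eq_iff_iff]
    simp only [List.any_eq_true]
    have hnotc : c ∉ rest.dropWhile (fun x => x == c) :=
      List.count_eq_zero.mp (pvDrop_count_zero c rest hp)
    have htake : ∀ y ∈ rest.takeWhile (fun x => x == c), y = c := by
      intro y hy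
      have hy' := List.mem_takeWhile_imp hy
      exact beq_iff_eq.mp hy'
    have hcountd : ∀ x ∈ rest.dropWhile (fun x => x == c),
        (c :: rest).count x = (rest.dropWhile (fun x => x == c)).count x := by
      intro x hx
      have hxc : x ≠ c := fun he => hnotc (he ▸ hx)
      have happ := List.count_append (a := x)
        (l₁ := rest.takeWhile (fun x => x == c)) (l₂ := rest.dropWhile (fun x => x == c))
      rw [List.takeWhile_append_dropWhile] at happ
      have htz : (rest.takeWhile (fun x => x == c)).count x = 0 :=
        List.count_eq_zero.mpr (fun hm => hxc (htake x hm))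
      have : (c :: rest).count x = rest.count x := by
        rw [List.count_cons]
        simp [Ne.symm hxc]
      omega
    constructor
    · rintro ⟨x, hx, hxn⟩
      exact ⟨x, List.mem_cons_of_mem c ((List.dropWhile_sublist _).mem hx),
        by rwa [hcountd x hx]⟩
    · rintro ⟨x, hx, hxn⟩
      rcases List.mem_cons.mp hx with rfl | hxr
      · exfalso
        rw [pvHead_count x rest hp] at hxn
        push_cast at hxn
        exact h hxn
      · have hsplit := List.takeWhile_append_dropWhile (p := fun x => x == c) (l := rest)
        rw [← hsplit, List.mem_append] at hxr
        rcases hxr with hxt | hxd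
        · exfalso
          have := htake x hxt
          subst this
          rw [pvHead_count x rest hp] at hxn
          push_cast at hxn
          exact h hxn
        · exact ⟨x, hxd, by rwa [← hcountd x hxd]⟩

theorem hasCharacterOccurringExactlyThisManyTimes_spec : Claim_equal_hasCharacterOccurringExactlyThisManyTimes := by
  intro boxID n _
  unfold Spec_hasCharacterOccurringExactlyThisManyTimes
  unfold hasCharacterOccurringExactlyThisManyTimes hasCharacterOccurringExactlyThisManyTimes_alt
  rw [pvFoldA_eq_counter, portA_eq_any]
  rw [pvRunScan_eq_any _ n (by
    have := PySem.List.sorted_pairwise boxID.toList (fun x => x) (κ := Char)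
    simpa using this)]
  -- both sides are 'some char has that count', invariant under the sorting permutation
  have hperm := PySem.List.sorted_perm boxID.toList (fun x : Char => x) false
  rw [Bool.eq_iff_iff]
  simp only [List.any_eq_true]
  constructor
  · rintro ⟨c, hc, h⟩
    exact ⟨c, hperm.mem_iff.mpr hc, by rwa [hperm.count_eq]⟩
  · rintro ⟨c, hc, h⟩
    exact ⟨c, hperm.mem_iff.mp hc, by rwa [← hperm.count_eq]⟩
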